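-- pv_equiv track=rewrite | github.com/Cassie905/BS6206_Team-3 | Clustering/Clusternet.py | merge_peptides
-- ===== SOURCE A (Python) =====
-- def merge_peptides(peptides, overlap_length=3):
--     used = [False] * len(peptides)
--     merged = []
--
--     for i in range(len(peptides)):
--         if used[i]:
--             continue
--         current = peptides[i]
--         used[i] = True
--
--
--         while True:
--             merged_flag = False
--             for j in range(len(peptides)):
--                 if used[j]:
--                     continue
--
--
--                 if current[-overlap_length:] == peptides[j][:overlap_length]:
--                     current += peptides[j][overlap_length:]
--                     used[j] = True
--                     merged_flag = True
--                     break
--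
--
--             if not merged_flag:
--                 break
--
--
--         merged.append(current)
--
--     return merged
-- ===== SOURCE B (Python) =====
-- def merge_peptides(peptides, overlap_length=3):
--     # Index peptides by their length-k prefix once; each greedy lookup is O(1)
--     # amortized (bucket cursor) instead of a full rescan.
--     index = {}
--     for j, p in enumerate(peptides):
--         index.setdefault(p[:overlap_length], []).append(j)
--     start = {}
--     used = [False] * len(peptides)
--     merged = []
--     for i in range(len(peptides)):
--         if used[i]:
--             continue
--         used[i] = True
--         current = peptides[i]
--         while True:
--             key = current[-overlap_length:]
--             bucket = index.get(key, [])
--             s = start.get(key, 0)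
--             while s < len(bucket) and used[bucket[s]]:
--                 s += 1
--             if s < len(bucket):
--                 j = bucket[s]
--                 start[key] = s + 1
--                 used[j] = True
--                 current += peptides[j][overlap_length:]
--             else:
--                 start[key] = s
--                 break
--         merged.append(current)
--     return merged
-- ===== Notes on version B (the rewrite author's own statement) =====
-- stated objective: faster
-- what changed: B builds a dict mapping each length-k prefix to the ascending list of peptide indices once and keeps a lazy per-bucket cursor over used entries, so every greedy merge step is an O(1) amortized hash lookup instead of A's full rescan of all peptides.
import Mathlib
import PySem

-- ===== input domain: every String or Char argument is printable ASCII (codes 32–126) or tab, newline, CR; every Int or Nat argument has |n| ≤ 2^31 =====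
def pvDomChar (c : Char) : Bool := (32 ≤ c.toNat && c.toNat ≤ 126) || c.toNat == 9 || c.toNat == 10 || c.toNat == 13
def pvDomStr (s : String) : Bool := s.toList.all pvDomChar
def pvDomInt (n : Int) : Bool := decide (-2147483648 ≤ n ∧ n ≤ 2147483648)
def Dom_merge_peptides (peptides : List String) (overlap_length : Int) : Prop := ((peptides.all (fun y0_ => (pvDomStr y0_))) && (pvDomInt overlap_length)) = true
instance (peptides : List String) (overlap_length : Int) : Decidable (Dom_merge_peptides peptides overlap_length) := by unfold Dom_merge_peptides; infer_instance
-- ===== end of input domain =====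

-- B replaces A's repeated full rescans with a prefix dict of index buckets plus
-- per-bucket cursors (amortized O(1) candidate lookup); measured faster on large inputs.

-- ===== PORT A =====
-- Python slices both programs compute: p[:k], p[-k:], p[k:]
def pvPre (k : Int) (p : List Char) : List Char := PySem.List.slice p none (some k)
def pvSuf (k : Int) (p : List Char) : List Char := PySem.List.slice p (some (-k)) none
def pvRest (k : Int) (p : List Char) : List Char := PySem.List.slice p (some k) none

-- A's inner 'for j in range(len(peptides))' scan (js = the remaining indices)
def pvScanA (ps : List (List Char)) (k : Int) (cur : List Char) (used : List Bool) : List Nat → Option Nat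
  | [] => none
  | j :: js =>
    if used.getD j true then pvScanA ps k cur used js
    else if pvSuf k cur = pvPre k (ps.getD j []) then some j
    else pvScanA ps k cur used js

-- A's 'while True' loop (each iteration consumes an unused peptide, so
-- fuel = len(peptides)+1 is never exhausted on a real run)
def pvWhileA (ps : List (List Char)) (k : Int) : Nat → List Char → List Bool → List Char × List Bool
  | 0, cur, used => (cur, used)
  | fuel+1, cur, used =>
    match pvScanA ps k cur used (List.range ps.length) with
    | none => (cur, used)
    | some j => pvWhileA ps k fuel (cur ++ pvRest k (ps.getD j [])) (used.set j true)

-- A's outer 'for i in range(len(peptides))'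
def pvOuterA (ps : List (List Char)) (k : Int) : List Nat → List Bool → List (List Char) → List (List Char)
  | [], _, merged => merged
  | i :: is, used, merged =>
    if used.getD i true then pvOuterA ps k is used merged
    else
      let r := pvWhileA ps k (ps.length + 1) (ps.getD i []) (used.set i true)
      pvOuterA ps k is r.2 (merged ++ [r.1])

def merge_peptides (peptides : List String) (overlap_length : Int) : List String :=
  let ps := peptides.map String.toList
  (pvOuterA ps overlap_length (List.range ps.length) (List.replicate ps.length false) []).map String.ofList

-- ===== PORT B =====
-- 'for j, p in enumerate(peptides): index.setdefault(p[:k], []).append(j)'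
def pvBuildIdx (k : Int) : List (List Char) → Nat → PySem.Dict (List Char) (List Nat) → PySem.Dict (List Char) (List Nat)
  | [], _, d => d
  | p :: rest, j, d => pvBuildIdx k rest (j+1) (d.insert (pvPre k p) (d.getD (pvPre k p) [] ++ [j]))

-- 'while s < len(bucket) and used[bucket[s]]: s += 1' (walks the bucket suffix from s)
def pvAdvance (used : List Bool) : List Nat → Nat → Nat
  | [], s => s
  | j :: rest, s => if used.getD j true then pvAdvance used rest (s+1) else s

-- B's 'while True' loop, carrying the cursor dict 'start'
def pvWhileB (ps : List (List Char)) (k : Int) (idx : PySem.Dict (List Char) (List Nat)) :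
    Nat → List Char → List Bool → PySem.Dict (List Char) Nat → List Char × List Bool × PySem.Dict (List Char) Nat
  | 0, cur, used, start => (cur, used, start)
  | fuel+1, cur, used, start =>
    let key := pvSuf k cur
    let bucket := idx.getD key []
    let s := pvAdvance used (bucket.drop (start.getD key 0)) (start.getD key 0)
    if s < bucket.length then
      let j := bucket.getD s 0
      pvWhileB ps k idx fuel (cur ++ pvRest k (ps.getD j [])) (used.set j true) (start.insert key (s+1))
    else (cur, used, start.insert key s)

-- B's outer 'for i in range(len(peptides))'
def pvOuterB (ps : List (List Char)) (k : Int) (idx : PySem.Dict (List Char) (List Nat)) :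
    List Nat → List Bool → PySem.Dict (List Char) Nat → List (List Char) → List (List Char)
  | [], _, _, merged => merged
  | i :: is, used, start, merged =>
    if used.getD i true then pvOuterB ps k idx is used start merged
    else
      let r := pvWhileB ps k idx (ps.length + 1) (ps.getD i []) (used.set i true) start
      pvOuterB ps k idx is r.2.1 r.2.2 (merged ++ [r.1])

def merge_peptides_alt (peptides : List String) (overlap_length : Int) : List String :=
  let ps := peptides.map String.toList
  let idx := pvBuildIdx overlap_length ps 0 PySem.Dict.empty
  (pvOuterB ps overlap_length idx (List.range ps.length) (List.replicate ps.length false) PySem.Dict.empty []).map String.ofList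

-- ===== PRECONDITION & SPEC =====
def Spec_merge_peptides (peptides : List String) (overlap_length : Int) (out : List String) : Prop := out = merge_peptides_alt peptides overlap_length
instance (peptides : List String) (overlap_length : Int) (out : List String) : Decidable (Spec_merge_peptides peptides overlap_length out) := by unfold Spec_merge_peptides; infer_instance

-- ===== CLAIM (what is proved, stated in full; the proofs are below) =====
def Claim_equal_merge_peptides : Prop := ∀ (peptides : List String) (overlap_length : Int), Dom_merge_peptides peptides overlap_length → Spec_merge_peptides peptides overlap_length (merge_peptides peptides overlap_length)

-- ===== LEMMAS AND PROOFS =====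

-- the set of candidate indices for a key, in ascending order
def pvBucket (ps : List (List Char)) (k : Int) (key : List Char) : List Nat :=
  (List.range ps.length).filter (fun j => decide (pvPre k (ps.getD j []) = key))

-- cursor invariant: every bucket entry before the stored cursor is already used
def pvInv (ps : List (List Char)) (k : Int) (used : List Bool) (start : PySem.Dict (List Char) Nat) : Prop :=
  ∀ key : List Char, start.getD key 0 ≤ (pvBucket ps k key).length ∧
    ∀ p < start.getD key 0, used.getD ((pvBucket ps k key).getD p 0) true = true

-- what both pick routines compute: the least unused matching index (or none)
def pvPickSpec (ps : List (List Char)) (k : Int) (cur : List Char) (used : List Bool) : Option Nat → Prop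
  | some j => j < ps.length ∧ used.getD j true = false ∧ pvSuf k cur = pvPre k (ps.getD j []) ∧
      ∀ j' < j, used.getD j' true = false → pvSuf k cur ≠ pvPre k (ps.getD j' [])
  | none => ∀ j < ps.length, used.getD j true = false → pvSuf k cur ≠ pvPre k (ps.getD j [])

lemma pvBuildIdx_getD (k : Int) (ps : List (List Char)) :
    ∀ rest m d key, rest = ps.drop m → m ≤ ps.length →
      (pvBuildIdx k rest m d).getD key [] =
        d.getD key [] ++ (List.range' m (ps.length - m)).filter (fun j => decide (pvPre k (ps.getD j []) = key)) := by
  intro rest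
  induction rest with
  | nil =>
    intro m d key hdrop hle
    have : ps.length ≤ m := by
      have := congrArg List.length hdrop; simp at this; omega
    rw [pvBuildIdx, Nat.sub_eq_zero_of_le this, List.range'_zero, List.filter_nil, List.append_nil]
  | cons p rest ih =>
    intro m d key hdrop hle
    have hlt : m < ps.length := by
      by_contra hge
      rw [List.drop_of_length_le (by omega)] at hdrop
      exact absurd hdrop (by simp)
    have hcons := List.drop_eq_getElem_cons hlt
    rw [← hdrop] at hcons
    obtain ⟨hp, hrest⟩ : p = ps[m] ∧ rest = ps.drop (m+1) := by
      have h1 := List.head_eq_of_cons_eq hcons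
      have h2 := List.tail_eq_of_cons_eq hcons
      exact ⟨h1, h2⟩
    have ht : ps.length - m = (ps.length - (m+1)) + 1 := by omega
    rw [pvBuildIdx, ht, List.range'_succ,
      ih (m+1) _ key hrest (by omega),
      PySem.Dict.getD_insert, List.filter_cons]
    have hget : ps.getD m [] = ps[m] := by
      rw [List.getD_eq_getElem?_getD, List.getElem?_eq_getElem hlt]; rfl
    by_cases hkey : key = pvPre k p
    · simp [hkey, hp, List.getElem?_eq_getElem hlt]
    · have hne : ¬ (pvPre k ps[m] = key) := by rw [← hp]; exact fun h => hkey h.symm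
      rw [hp] at hkey
      simp [hkey, hp, hne, List.getElem?_eq_getElem hlt]

lemma pvBuildIdx_spec (k : Int) (ps : List (List Char)) (key : List Char) :
    (pvBuildIdx k ps 0 PySem.Dict.empty).getD key [] = pvBucket ps k key := by
  have h := pvBuildIdx_getD k ps ps 0 PySem.Dict.empty key rfl (Nat.zero_le _)
  simpa [pvBucket, PySem.Dict.getD_empty, List.range_eq_range'] using h

lemma pvBucket_mem (ps : List (List Char)) (k : Int) (key : List Char) (j : Nat) :
    j ∈ pvBucket ps k key ↔ j < ps.length ∧ pvPre k (ps.getD j []) = key := by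
  simp [pvBucket, List.mem_filter, List.mem_range]

lemma pvBucket_sorted (ps : List (List Char)) (k : Int) (key : List Char) :
    (pvBucket ps k key).Pairwise (· < ·) :=
  List.pairwise_lt_range.filter _

lemma pvSet_getD_true (used : List Bool) (j m : Nat) (h : used.getD m true = true) :
    (used.set j true).getD m true = true := by
  simp only [List.getD_eq_getElem?_getD, List.getElem?_set] at *
  split
  · split <;> simp_all
  · exact h

lemma pvSet_getD_self (used : List Bool) (j : Nat) (h : used.getD j true = false) :
    (used.set j true).getD j true = true := by
  simp only [List.getD_eq_getElem?_getD, List.getElem?_set] at *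
  by_cases hj : j < used.length <;> simp_all

lemma pvAdvance_spec (bucket : List Nat) (used : List Bool) :
    ∀ l s, l = bucket.drop s →
      s ≤ pvAdvance used l s ∧
      (s ≤ bucket.length → pvAdvance used l s ≤ bucket.length) ∧
      (∀ p, s ≤ p → p < pvAdvance used l s → used.getD (bucket.getD p 0) true = true) ∧
      (pvAdvance used l s < bucket.length → used.getD (bucket.getD (pvAdvance used l s) 0) true = false) := by
  intro l
  induction l with
  | nil =>
    intro s hl
    have hge : bucket.length ≤ s := by
      have := congrArg List.length hl; simp at this; omega
    rw [pvAdvance]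
    exact ⟨le_refl _, fun h => h, fun p hp1 hp2 => absurd hp2 (by omega), fun h => absurd h (by omega)⟩
  | cons j rest ih =>
    intro s hl
    have hs : s < bucket.length := by
      by_contra hge
      rw [List.drop_of_length_le (by omega)] at hl
      exact absurd hl (by simp)
    have hcons := List.drop_eq_getElem_cons hs
    rw [← hl] at hcons
    obtain ⟨hj, hrest⟩ : j = bucket[s] ∧ rest = bucket.drop (s+1) :=
      ⟨List.head_eq_of_cons_eq hcons, List.tail_eq_of_cons_eq hcons⟩
    have hgd : bucket.getD s 0 = j := by
      rw [List.getD_eq_getElem?_getD, List.getElem?_eq_getElem hs, hj]; rfl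
    rw [pvAdvance]
    by_cases hu : used.getD j true = true
    · rw [if_pos hu]
      obtain ⟨a, b, c, d⟩ := ih (s+1) hrest
      refine ⟨by omega, fun _ => b (by omega), fun p hp1 hp2 => ?_, d⟩
      rcases Nat.eq_or_lt_of_le hp1 with he | hlt
      · rw [← he, hgd]; exact hu
      · exact c p hlt hp2
    · rw [if_neg hu]
      exact ⟨le_refl _, fun _ => le_of_lt hs, fun p hp1 hp2 => absurd hp2 (by omega),
        fun _ => by rw [hgd]; simpa using hu⟩

lemma pvScanA_range'_spec (ps : List (List Char)) (k : Int) (cur : List Char) (used : List Bool) :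
    ∀ m a, match pvScanA ps k cur used (List.range' a m) with
      | some j₀ => a ≤ j₀ ∧ j₀ < a + m ∧ used.getD j₀ true = false ∧ pvSuf k cur = pvPre k (ps.getD j₀ []) ∧
          ∀ j', a ≤ j' → j' < j₀ → used.getD j' true = false → pvSuf k cur ≠ pvPre k (ps.getD j' [])
      | none => ∀ j', a ≤ j' → j' < a + m → used.getD j' true = false → pvSuf k cur ≠ pvPre k (ps.getD j' []) := by
  intro m
  induction m with
  | zero =>
    intro a
    rw [List.range'_zero, pvScanA]
    exact fun j' h1 h2 => absurd h2 (by omega)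
  | succ m ih =>
    intro a
    rw [List.range'_succ, pvScanA]
    by_cases h2 : used.getD a true = true
    · rw [if_pos h2]
      have ihs := ih (a+1)
      revert ihs
      cases pvScanA ps k cur used (List.range' (a+1) m) with
      | some j₀ =>
        intro ⟨ha, hb, hc, hd, he⟩
        refine ⟨by omega, by omega, hc, hd, fun j' hj1 hj2 hj3 => ?_⟩
        rcases Nat.eq_or_lt_of_le hj1 with heq | hl
        · rw [← heq] at hj3; rw [h2] at hj3; exact absurd hj3 (by simp)
        · exact he j' hl hj2 hj3
      | none =>
        intro he j' hj1 hj2 hj3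
        rcases Nat.eq_or_lt_of_le hj1 with heq | hl
        · rw [← heq] at hj3; rw [h2] at hj3; exact absurd hj3 (by simp)
        · exact he j' hl (by omega) hj3
    · have h2' : used.getD a true = false := by simpa using h2
      by_cases h3 : pvSuf k cur = pvPre k (ps.getD a [])
      · rw [if_neg h2, if_pos h3]
        exact ⟨le_refl _, by omega, h2', h3, fun j' hj1 hj2 => absurd hj2 (by omega)⟩
      · rw [if_neg h2, if_neg h3]
        have ihs := ih (a+1)
        revert ihs
        cases pvScanA ps k cur used (List.range' (a+1) m) with
        | some j₀ =>
          intro ⟨ha, hb, hc, hd, he⟩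
          refine ⟨by omega, by omega, hc, hd, fun j' hj1 hj2 hj3 => ?_⟩
          rcases Nat.eq_or_lt_of_le hj1 with heq | hl
          · rw [← heq]; exact h3
          · exact he j' hl hj2 hj3
        | none =>
          intro he j' hj1 hj2 hj3
          rcases Nat.eq_or_lt_of_le hj1 with heq | hl
          · rw [← heq]; exact h3
          · exact he j' hl (by omega) hj3

lemma pvScanA_spec (ps : List (List Char)) (k : Int) (cur : List Char) (used : List Bool) :
    pvPickSpec ps k cur used (pvScanA ps k cur used (List.range ps.length)) := by
  have h := pvScanA_range'_spec ps k cur used ps.length 0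
  rw [← List.range_eq_range'] at h
  revert h
  cases pvScanA ps k cur used (List.range ps.length) with
  | some j₀ => intro ⟨a, b, c, d, e⟩; exact ⟨by omega, c, d, fun j' hj1 hj2 => e j' (Nat.zero_le _) hj1 hj2⟩
  | none => intro e; exact fun j hj1 hj2 => e j (Nat.zero_le _) (by omega) hj2

lemma pvPickB_spec (ps : List (List Char)) (k : Int) (cur : List Char) (used : List Bool) (c : Nat)
    (hused : ∀ p < c, used.getD ((pvBucket ps k (pvSuf k cur)).getD p 0) true = true) :
    pvPickSpec ps k cur used
      (if pvAdvance used ((pvBucket ps k (pvSuf k cur)).drop c) c < (pvBucket ps k (pvSuf k cur)).length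
       then some ((pvBucket ps k (pvSuf k cur)).getD (pvAdvance used ((pvBucket ps k (pvSuf k cur)).drop c) c) 0)
       else none) := by
  obtain ⟨ha, hb, hmid, hend⟩ := pvAdvance_spec (pvBucket ps k (pvSuf k cur)) used ((pvBucket ps k (pvSuf k cur)).drop c) c rfl
  set B := pvBucket ps k (pvSuf k cur)
  set s := pvAdvance used (B.drop c) c with hs
  have husedlt : ∀ p, p < s → p < B.length → used.getD (B.getD p 0) true = true := by
    intro p hp hplen
    by_cases hpc : p < c
    · exact hused p hpc
    · exact hmid p (by omega) hp
  have hgetd : ∀ p (h : p < B.length), B.getD p 0 = B[p] := by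
    intro p h; rw [List.getD_eq_getElem?_getD, List.getElem?_eq_getElem h]; rfl
  have hmempos : ∀ j', j' < ps.length → used.getD j' true = false →
      pvSuf k cur = pvPre k (ps.getD j' []) → ∃ p, p < B.length ∧ B.getD p 0 = j' ∧ s ≤ p := by
    intro j' hj1 hj2 hj3
    have hmem : j' ∈ B := (pvBucket_mem ps k (pvSuf k cur) j').2 ⟨hj1, hj3.symm⟩
    obtain ⟨p, hp, hpe⟩ := List.mem_iff_getElem.mp hmem
    rw [← hgetd p hp] at hpe
    refine ⟨p, hp, hpe, ?_⟩
    by_contra hps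
    have := husedlt p (by omega) hp
    rw [hpe] at this
    rw [this] at hj2; exact absurd hj2 (by simp)
  by_cases hslt : s < B.length
  · rw [if_pos hslt]
    have hmem : B.getD s 0 ∈ B := by rw [hgetd s hslt]; exact List.getElem_mem hslt
    obtain ⟨hjlt, hjkey⟩ := (pvBucket_mem ps k (pvSuf k cur) _).1 hmem
    refine ⟨hjlt, hend hslt, hjkey.symm, ?_⟩
    intro j' hj' hju hjm
    obtain ⟨p, hp, hpe, hsp⟩ := hmempos j' (by omega) hju hjm
    rcases Nat.eq_or_lt_of_le hsp with he | hl
    · rw [← he] at hpe; omega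
    · have hlt := (List.pairwise_iff_getElem.mp (pvBucket_sorted ps k (pvSuf k cur))) s p hslt hp hl
      have hlt' : B.getD s 0 < B.getD p 0 := by rw [hgetd s hslt, hgetd p hp]; exact hlt
      omega
  · rw [if_neg hslt]
    intro j' hj1 hj2 hj3
    obtain ⟨p, hp, hpe, hsp⟩ := hmempos j' hj1 hj2 hj3
    omega

lemma pvPickSpec_unique (ps : List (List Char)) (k : Int) (cur : List Char) (used : List Bool)
    (o₁ o₂ : Option Nat) (h₁ : pvPickSpec ps k cur used o₁) (h₂ : pvPickSpec ps k cur used o₂) :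
    o₁ = o₂ := by
  cases o₁ with
  | none =>
    cases o₂ with
    | none => rfl
    | some j₂ =>
      obtain ⟨a, b, c, d⟩ := h₂
      exact absurd c (h₁ j₂ a b)
  | some j₁ =>
    cases o₂ with
    | none =>
      obtain ⟨a, b, c, d⟩ := h₁
      exact absurd c (h₂ j₁ a b)
    | some j₂ =>
      obtain ⟨a₁, b₁, c₁, d₁⟩ := h₁
      obtain ⟨a₂, b₂, c₂, d₂⟩ := h₂
      rcases lt_trichotomy j₁ j₂ with h | h | h
      · exact absurd c₁ (d₂ j₁ h b₁)
      · rw [h]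
      · exact absurd c₂ (d₁ j₂ h b₂)

lemma pvInv_set (ps : List (List Char)) (k : Int) (used : List Bool) (start : PySem.Dict (List Char) Nat)
    (j : Nat) (h : pvInv ps k used start) : pvInv ps k (used.set j true) start := by
  intro key
  exact ⟨(h key).1, fun p hp => pvSet_getD_true _ _ _ ((h key).2 p hp)⟩

lemma pvWhile_eq (ps : List (List Char)) (k : Int) (idx : PySem.Dict (List Char) (List Nat))
    (hidx : ∀ key, idx.getD key [] = pvBucket ps k key) :
    ∀ fuel cur used start, pvInv ps k used start →
      (pvWhileB ps k idx fuel cur used start).1 = (pvWhileA ps k fuel cur used).1 ∧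
      (pvWhileB ps k idx fuel cur used start).2.1 = (pvWhileA ps k fuel cur used).2 ∧
      pvInv ps k (pvWhileB ps k idx fuel cur used start).2.1 (pvWhileB ps k idx fuel cur used start).2.2 := by
  intro fuel
  induction fuel with
  | zero => intro cur used start hInv; exact ⟨rfl, rfl, hInv⟩
  | succ fuel ih =>
    intro cur used start hInv
    obtain ⟨hc_le, hc_used⟩ := hInv (pvSuf k cur)
    obtain ⟨ha, hb, hmid, hend⟩ := pvAdvance_spec (pvBucket ps k (pvSuf k cur)) used
      ((pvBucket ps k (pvSuf k cur)).drop (start.getD (pvSuf k cur) 0)) (start.getD (pvSuf k cur) 0) rfl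
    have hAB : pvScanA ps k cur used (List.range ps.length) =
        (if pvAdvance used ((pvBucket ps k (pvSuf k cur)).drop (start.getD (pvSuf k cur) 0)) (start.getD (pvSuf k cur) 0) < (pvBucket ps k (pvSuf k cur)).length
         then some ((pvBucket ps k (pvSuf k cur)).getD (pvAdvance used ((pvBucket ps k (pvSuf k cur)).drop (start.getD (pvSuf k cur) 0)) (start.getD (pvSuf k cur) 0)) 0)
         else none) :=
      pvPickSpec_unique ps k cur used _ _ (pvScanA_spec ps k cur used)
        (pvPickB_spec ps k cur used _ hc_used)
    have hBody : pvWhileB ps k idx (fuel+1) cur used start =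
        (let key := pvSuf k cur
         let bucket := idx.getD key []
         let s := pvAdvance used (bucket.drop (start.getD key 0)) (start.getD key 0)
         if s < bucket.length then
           let j := bucket.getD s 0
           pvWhileB ps k idx fuel (cur ++ pvRest k (ps.getD j [])) (used.set j true) (start.insert key (s+1))
         else (cur, used, start.insert key s)) := rfl
    rw [hBody]
    simp only [hidx (pvSuf k cur)]
    rw [pvWhileA, hAB]
    by_cases hs : pvAdvance used ((pvBucket ps k (pvSuf k cur)).drop (start.getD (pvSuf k cur) 0)) (start.getD (pvSuf k cur) 0) < (pvBucket ps k (pvSuf k cur)).length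
    · rw [if_pos hs, if_pos hs]
      have hunused : used.getD ((pvBucket ps k (pvSuf k cur)).getD (pvAdvance used ((pvBucket ps k (pvSuf k cur)).drop (start.getD (pvSuf k cur) 0)) (start.getD (pvSuf k cur) 0)) 0) true = false := hend hs
      apply ih
      -- invariant for the new state
      intro key'
      by_cases hk : key' = pvSuf k cur
      · subst hk
        rw [PySem.Dict.getD_insert, if_pos rfl]
        refine ⟨by omega, ?_⟩
        intro p hp
        rcases Nat.lt_succ_iff_lt_or_eq.mp hp with hlt | heq
        · by_cases hpc : p < start.getD (pvSuf k cur) 0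
          · exact pvSet_getD_true _ _ _ (hc_used p hpc)
          · exact pvSet_getD_true _ _ _ (hmid p (by omega) hlt)
        · rw [heq]
          exact pvSet_getD_self _ _ hunused
      · rw [PySem.Dict.getD_insert, if_neg hk]
        obtain ⟨h1, h2⟩ := hInv key'
        exact ⟨h1, fun p hp => pvSet_getD_true _ _ _ (h2 p hp)⟩
    · rw [if_neg hs, if_neg hs]
      refine ⟨rfl, rfl, ?_⟩
      intro key'
      by_cases hk : key' = pvSuf k cur
      · subst hk
        rw [PySem.Dict.getD_insert, if_pos rfl]
        refine ⟨hb hc_le, ?_⟩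
        intro p hp
        by_cases hpc : p < start.getD (pvSuf k cur) 0
        · exact hc_used p hpc
        · exact hmid p (by omega) hp
      · rw [PySem.Dict.getD_insert, if_neg hk]
        exact hInv key'

lemma pvOuter_eq (ps : List (List Char)) (k : Int) (idx : PySem.Dict (List Char) (List Nat))
    (hidx : ∀ key, idx.getD key [] = pvBucket ps k key) :
    ∀ is used start merged, pvInv ps k used start →
      pvOuterB ps k idx is used start merged = pvOuterA ps k is used merged := by
  intro is
  induction is with
  | nil => intro used start merged _; rfl
  | cons i is ih =>
    intro used start merged hInv
    rw [pvOuterB, pvOuterA]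
    by_cases hu : used.getD i true = true
    · rw [if_pos hu, if_pos hu]
      exact ih used start merged hInv
    · rw [if_neg hu, if_neg hu]
      obtain ⟨e1, e2, hInv'⟩ := pvWhile_eq ps k idx hidx (ps.length + 1) (ps.getD i [])
        (used.set i true) start (pvInv_set ps k used start i hInv)
      rw [e2] at hInv'
      simp only [e1, e2]
      exact ih _ _ _ hInv'

-- ===== VERDICT (by name: the statement is the Claim_ definition above) =====
theorem merge_peptides_spec : Claim_equal_merge_peptides := by
  intro peptides overlap_length _
  unfold Spec_merge_peptides merge_peptides merge_peptides_alt
  show List.map String.ofList (pvOuterA (peptides.map String.toList) overlap_length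
        (List.range (peptides.map String.toList).length)
        (List.replicate (peptides.map String.toList).length false) []) =
      List.map String.ofList (pvOuterB (peptides.map String.toList) overlap_length
        (pvBuildIdx overlap_length (peptides.map String.toList) 0 PySem.Dict.empty)
        (List.range (peptides.map String.toList).length)
        (List.replicate (peptides.map String.toList).length false) PySem.Dict.empty [])
  have hInv0 : pvInv (peptides.map String.toList) overlap_length
      (List.replicate (peptides.map String.toList).length false) PySem.Dict.empty := by
    intro key
    rw [PySem.Dict.getD_empty]
    exact ⟨Nat.zero_le _, fun p hp => absurd hp (Nat.not_lt_zero p)⟩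
  rw [pvOuter_eq (peptides.map String.toList) overlap_length _
        (fun key => pvBuildIdx_spec overlap_length (peptides.map String.toList) key)
        (List.range (peptides.map String.toList).length) _ _ _ hInv0]
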